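-- pv_equiv track=rewrite | github.com/marekjm/ngmake | ngmake.py | split_macro_overloads
-- ===== SOURCE A (Python) =====
-- def split_macro_overloads(tokens):
--     overloads = []
--
--     clause = []
--     i = 0
--     limit = len(tokens)
--
--     while i < limit:
--         clause.append(tokens[i])
--         if tokens[i] in (';', '.',):
--             overloads.append(clause)
--             clause = []
--         i += 1
--
--     return overloads
-- ===== SOURCE B (Python) =====
-- def split_macro_overloads(tokens):
--     delims = [i for i, t in enumerate(tokens) if t in (';', '.')]
--     overloads = []
--     start = 0
--     for d in delims:
--         overloads.append(list(tokens[start:d + 1]))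
--         start = d + 1
--     return overloads
-- ===== Notes on version B (the rewrite author's own statement) =====
-- stated objective: alternative
-- what changed: Replaced the single-pass clause-accumulator loop by a two-phase index-then-slice algorithm: first collect the positions of ';'/'.' delimiters, then cut the token list into slices between consecutive delimiters.
import Mathlib
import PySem

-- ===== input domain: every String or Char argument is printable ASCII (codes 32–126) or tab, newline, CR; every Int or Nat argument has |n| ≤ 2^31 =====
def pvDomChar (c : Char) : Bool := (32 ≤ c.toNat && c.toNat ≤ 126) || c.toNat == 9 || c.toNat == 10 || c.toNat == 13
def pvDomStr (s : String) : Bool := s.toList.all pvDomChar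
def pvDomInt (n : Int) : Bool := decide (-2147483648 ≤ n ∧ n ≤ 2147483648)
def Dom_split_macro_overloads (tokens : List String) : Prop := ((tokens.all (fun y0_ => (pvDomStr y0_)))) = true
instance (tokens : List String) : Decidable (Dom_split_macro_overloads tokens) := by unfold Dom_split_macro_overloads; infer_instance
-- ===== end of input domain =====

-- B replaces A's single-pass clause accumulator by a two-phase index-then-slice algorithm (alternative decomposition, same cost).

-- ===== PORT A =====
-- while loop over i appending tokens[i] to the current clause, flushing at ';'/'.'; ported as a fold over tokens with state (overloads, clause)
def split_macro_overloads (tokens : List String) : List (List String) :=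
  (tokens.foldl
    (fun (st : List (List String) × List String) t =>
      let clause := st.2 ++ [t]
      if t == ";" || t == "." then (st.1 ++ [clause], []) else (st.1, clause))
    ([], [])).1

-- ===== PORT B =====
-- phase 1: indices of delimiters; phase 2: cut slices between consecutive delimiters
def split_macro_overloads_alt (tokens : List String) : List (List String) :=
  let delims : List Int :=
    ((PySem.List.enumerate tokens 0).filter (fun p => p.2 == ";" || p.2 == ".")).map Prod.fst
  (delims.foldl
    (fun (st : List (List String) × Int) d =>
      (st.1 ++ [PySem.List.slice tokens (some st.2) (some (d + 1))], d + 1))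
    ([], 0)).1

-- ===== PRECONDITION & SPEC =====
def Spec_split_macro_overloads (tokens : List String) (out : List (List String)) : Prop := out = split_macro_overloads_alt tokens
instance (tokens : List String) (out : List (List String)) : Decidable (Spec_split_macro_overloads tokens out) := by unfold Spec_split_macro_overloads; infer_instance

-- ===== CLAIM (what is proved, stated in full; the proofs are below) =====
def Claim_equal_split_macro_overloads : Prop := ∀ (tokens : List String), Dom_split_macro_overloads tokens → Spec_split_macro_overloads tokens (split_macro_overloads tokens)

-- ===== LEMMAS AND PROOFS =====
-- recursive characterisation of the split (trailing tokens after the last delimiter are dropped)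
def splitD : List String → List (List String)
  | [] => []
  | t :: ts => if t == ";" || t == "." then [t] :: splitD ts else (splitD ts).modifyHead (fun c => t :: c)

lemma modifyHead_cons_append (cl : List String) (t : String) (l : List (List String)) :
    l.modifyHead (fun c => (cl ++ [t]) ++ c) = (l.modifyHead (fun c => t :: c)).modifyHead (fun c => cl ++ c) := by
  cases l <;> simp

-- A's fold computes splitD
lemma foldA_eq (ts : List String) : ∀ (acc : List (List String)) (cl : List String),
    (ts.foldl
      (fun (st : List (List String) × List String) t =>
        let clause := st.2 ++ [t]
        if t == ";" || t == "." then (st.1 ++ [clause], []) else (st.1, clause))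
      (acc, cl)).1 = acc ++ (splitD ts).modifyHead (fun c => cl ++ c) := by
  induction ts with
  | nil => intro acc cl; simp [splitD]
  | cons t ts ih =>
    intro acc cl
    simp only [List.foldl_cons]
    by_cases h : (t == ";" || t == ".") = true
    · rw [if_pos h, ih, show splitD (t :: ts) = [t] :: splitD ts by simp [splitD, h]]
      cases splitD ts <;> simp
    · rw [if_neg h, ih, show splitD (t :: ts) = (splitD ts).modifyHead (fun c => t :: c) by simp [splitD, h]]
      rw [modifyHead_cons_append]

-- B's fold over the delimiter indices of ts, with the already-consumed tokens split as pre ++ cl, computes splitD ts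
lemma foldB_eq (ts : List String) : ∀ (pre cl : List String) (acc : List (List String)),
    ((((PySem.List.enumerate ts ((pre.length : Int) + (cl.length : Int))).filter
        (fun p => p.2 == ";" || p.2 == ".")).map Prod.fst).foldl
      (fun (st : List (List String) × Int) d =>
        (st.1 ++ [PySem.List.slice (pre ++ cl ++ ts) (some st.2) (some (d + 1))], d + 1))
      (acc, (pre.length : Int))).1 = acc ++ (splitD ts).modifyHead (fun c => cl ++ c) := by
  induction ts with
  | nil => intro pre cl acc; simp [PySem.List.enumerate_nil, splitD]
  | cons t ts ih =>
    intro pre cl acc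
    rw [PySem.List.enumerate_cons]
    simp only [List.filter_cons]
    by_cases h : (t == ";" || t == ".") = true
    · rw [if_pos (by simpa using h)]
      simp only [List.map_cons, List.foldl_cons]
      rw [show splitD (t :: ts) = [t] :: splitD ts by simp [splitD, h]]
      have hslice : PySem.List.slice (pre ++ cl ++ (t :: ts)) (some (pre.length : Int))
          (some ((pre.length : Int) + (cl.length : Int) + 1)) = cl ++ [t] := by
        have hb : (pre.length : Int) + (cl.length : Int) + 1 = ((pre.length + (cl.length + 1) : Nat) : Int) := by
          omega
        rw [hb, PySem.List.slice_natCast]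
        rw [show pre ++ cl ++ (t :: ts) = pre ++ (cl ++ t :: ts) by simp, List.drop_left]
        rw [show pre.length + (cl.length + 1) - pre.length = cl.length + 1 by omega]
        rw [show cl ++ t :: ts = (cl ++ [t]) ++ ts by simp,
            show cl.length + 1 = (cl ++ [t]).length by simp, List.take_left]
      simp only [hslice]
      have hstep := ih (pre ++ cl ++ [t]) [] (acc ++ [cl ++ [t]])
      simp only [List.length_append, List.length_cons, List.length_nil] at hstep
      have hc1 : ((pre.length + cl.length + 1 : Nat) : Int) + ((0 : Nat) : Int)
          = (pre.length : Int) + (cl.length : Int) + 1 := by omega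
      have hc2 : ((pre.length + cl.length + 1 : Nat) : Int) = (pre.length : Int) + (cl.length : Int) + 1 := by
        omega
      have harr2 : (pre ++ cl ++ [t]) ++ [] ++ ts = pre ++ cl ++ (t :: ts) := by simp
      rw [hc1, hc2, harr2] at hstep
      rw [hstep]
      cases splitD ts <;> simp
    · rw [if_neg (by simpa using h)]
      rw [show splitD (t :: ts) = (splitD ts).modifyHead (fun c => t :: c) by simp [splitD, h]]
      have hstep := ih pre (cl ++ [t]) acc
      have hc1 : (pre.length : Int) + ((cl ++ [t]).length : Int) = (pre.length : Int) + (cl.length : Int) + 1 := by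
        simp; ring
      have harr2 : pre ++ (cl ++ [t]) ++ ts = pre ++ cl ++ (t :: ts) := by simp
      rw [hc1, harr2] at hstep
      rw [hstep, modifyHead_cons_append]

-- ===== VERDICT (by name: the statement is the Claim_ definition above) =====
theorem split_macro_overloads_spec : Claim_equal_split_macro_overloads := by
  intro tokens _
  unfold Spec_split_macro_overloads split_macro_overloads split_macro_overloads_alt
  rw [foldA_eq tokens [] []]
  have h := foldB_eq tokens [] [] []
  simp only [List.length_nil, Nat.cast_zero, List.nil_append, add_zero] at h
  rw [h]
  simp
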